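-- pv_equiv track=rewrite | github.com/sadeghb/audio-edit-dataset-pipeline | src/services/mfa_chunk_validator_service.py | _collect_words_from_chars
-- ===== SOURCE A (Python) =====
-- from typing import Any, Dict, List
--
-- def _collect_words_from_chars(char_tokens: List[str]) -> List[str]:
--     """Helper to group MFA's character-based OOV output into words."""
--     words, current_word = [], []
--     for token in char_tokens:
--         token = token.strip()
--         if not token: # An empty token indicates a word boundary.
--             if current_word:
--                 words.append("".join(current_word))
--                 current_word = []
--         else:
--             current_word.append(token)
--     if current_word:
--         words.append("".join(current_word))
--     return words
-- ===== SOURCE B (Python) =====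
-- from typing import Any, Dict, List
--
-- def _collect_words_from_chars(char_tokens: List[str]) -> List[str]:
--     """Group MFA's character-based OOV output into words: strip all tokens
--     first, then scan maximal runs of non-empty tokens and join each run."""
--     toks = [t.strip() for t in char_tokens]
--     words = []
--     i, n = 0, len(toks)
--     while i < n:
--         if not toks[i]:
--             i += 1
--             continue
--         j = i
--         while j < n and toks[j]:
--             j += 1
--         words.append("".join(toks[i:j]))
--         i = j
--     return words
-- ===== Notes on version B (the rewrite author's own statement) =====
-- stated objective: alternative
-- what changed: Replaces the single-pass accumulator loop (current_word list plus a duplicated post-loop flush) with a strip-everything-first pass followed by a run scanner that joins each maximal run of non-empty stripped tokens, so there is no carried word state and no flush.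
import Mathlib
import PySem

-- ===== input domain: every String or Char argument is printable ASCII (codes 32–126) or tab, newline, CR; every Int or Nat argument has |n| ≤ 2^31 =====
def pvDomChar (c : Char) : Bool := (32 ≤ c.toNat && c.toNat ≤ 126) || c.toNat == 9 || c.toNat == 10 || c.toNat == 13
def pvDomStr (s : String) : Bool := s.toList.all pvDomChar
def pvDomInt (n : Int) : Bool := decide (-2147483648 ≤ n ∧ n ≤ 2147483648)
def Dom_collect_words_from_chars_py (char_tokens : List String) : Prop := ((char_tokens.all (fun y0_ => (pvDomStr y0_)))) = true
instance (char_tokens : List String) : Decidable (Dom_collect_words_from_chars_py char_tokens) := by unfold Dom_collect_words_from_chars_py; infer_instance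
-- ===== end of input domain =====

-- B replaces A's carried current_word accumulator (and its duplicated post-loop flush)
-- by stripping all tokens first and then joining each maximal run of non-empty tokens
-- (objective: alternative decomposition, same cost).


-- ===== PORT A =====
def collect_words_from_chars_py (char_tokens : List String) : List String :=
  let r := char_tokens.foldl (fun (st : List String × List String) token =>
      let token := PySem.Str.strip token
      if token = "" then
        if st.2 ≠ [] then (st.1 ++ [PySem.Str.join "" st.2], ([] : List String)) else st
      else (st.1, st.2 ++ [token])) ([], [])
  if r.2 ≠ [] then r.1 ++ [PySem.Str.join "" r.2] else r.1

-- ===== PORT B =====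
-- B's inner index scan (advance j to the end of the run of non-empty tokens, join
-- toks[i:j], continue at j) is ported as the span takeWhile/dropWhile on the current
-- suffix: the same run, the same join, the same continuation point — exact.
def pvRuns : List String → List String
  | [] => []
  | t :: ts =>
    if t = "" then pvRuns ts
    else PySem.Str.join "" ((t :: ts).takeWhile (fun s => s != "")) ::
         pvRuns ((t :: ts).dropWhile (fun s => s != ""))
termination_by l => l.length
decreasing_by
  · simp
  · have h : (t != "") = true := by simpa using ‹¬ t = ""›
    have := List.length_dropWhile_le (fun s => s != "") ts
    simp [List.dropWhile_cons, h]
    omega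

def collect_words_from_chars_py_alt (char_tokens : List String) : List String :=
  pvRuns (char_tokens.map PySem.Str.strip)

-- ===== PRECONDITION & SPEC =====
def Spec_collect_words_from_chars_py (char_tokens : List String) (out : List String) : Prop := out = collect_words_from_chars_py_alt char_tokens
instance (char_tokens : List String) (out : List String) : Decidable (Spec_collect_words_from_chars_py char_tokens out) := by unfold Spec_collect_words_from_chars_py; infer_instance

-- ===== CLAIM (what is proved, stated in full; the proofs are below) =====
def Claim_equal_collect_words_from_chars_py : Prop := ∀ (char_tokens : List String), Dom_collect_words_from_chars_py char_tokens → Spec_collect_words_from_chars_py char_tokens (collect_words_from_chars_py char_tokens)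

-- ===== LEMMAS AND PROOFS =====

-- A's loop body on an already-stripped token, and the post-loop flush.
def pvStep (st : List String × List String) (token : String) : List String × List String :=
  if token = "" then
    if st.2 ≠ [] then (st.1 ++ [PySem.Str.join "" st.2], ([] : List String)) else st
  else (st.1, st.2 ++ [token])

def pvFin (st : List String × List String) : List String :=
  if st.2 ≠ [] then st.1 ++ [PySem.Str.join "" st.2] else st.1

lemma pvStep_shift (w c : List String) (t : String) :
    pvStep (w, c) t = (w ++ (pvStep ([], c) t).1, (pvStep ([], c) t).2) := by
  unfold pvStep; split_ifs <;> simp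

lemma pvFoldl_shift (ts : List String) : ∀ w c : List String,
    List.foldl pvStep (w, c) ts
      = (w ++ (List.foldl pvStep ([], c) ts).1, (List.foldl pvStep ([], c) ts).2) := by
  induction ts with
  | nil => intro w c; simp
  | cons t ts ih =>
    intro w c
    simp only [List.foldl_cons]
    rw [pvStep_shift w c t]
    rcases h : pvStep ([], c) t with ⟨a, b⟩
    rw [ih (w ++ a) b, ih a b, List.append_assoc]

lemma pvFin_shift (w : List String) (st : List String × List String) :
    pvFin (w ++ st.1, st.2) = w ++ pvFin st := by
  unfold pvFin; split_ifs <;> simp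

lemma pvMain (ts : List String) : ∀ c : List String,
    pvFin (List.foldl pvStep ([], c) ts)
      = if c = [] then pvRuns ts
        else PySem.Str.join "" (c ++ ts.takeWhile (fun s => s != ""))
              :: pvRuns (ts.dropWhile (fun s => s != "")) := by
  induction ts with
  | nil =>
    intro c
    by_cases hc : c = [] <;> simp [hc, pvFin, pvRuns]
  | cons t ts ih =>
    intro c
    by_cases ht : t = ""
    · subst ht
      by_cases hc : c = []
      · subst hc
        simp only [List.foldl_cons, pvStep, if_pos rfl]
        simp [ih, pvRuns]
      · simp only [List.foldl_cons, pvStep, if_pos rfl, if_pos hc]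
        rw [pvFoldl_shift, pvFin_shift]
        simp [ih, hc, pvRuns, List.dropWhile_cons]
    · have hne : ("" : String) ≠ t := fun h => ht h.symm
      simp only [List.foldl_cons, pvStep, if_neg (Ne.symm hne)]
      rw [ih (c ++ [t])]
      have hb : (t != "") = true := by simpa using ht
      by_cases hc : c = []
      · subst hc
        simp [pvRuns, ht, hb, List.takeWhile_cons, List.dropWhile_cons]
      · simp [hc, hb, List.takeWhile_cons, List.dropWhile_cons]

-- ===== VERDICT (by name: the statement is the Claim_ definition above) =====
theorem collect_words_from_chars_py_spec : Claim_equal_collect_words_from_chars_py := by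
  intro ts _
  show collect_words_from_chars_py ts = collect_words_from_chars_py_alt ts
  have hA : collect_words_from_chars_py ts
      = pvFin (List.foldl pvStep ([], []) (ts.map PySem.Str.strip)) := by
    rw [List.foldl_map]; rfl
  rw [hA, pvMain, if_pos rfl]; rfl
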